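-- pv_equiv track=rewrite | github.com/juderozario08/PythonProjects | ExamReview/dictionaryQandA.py | sortNums
-- ===== SOURCE A (Python) =====
-- def sortNums(nums):
--     sorted = {}
--     for num in nums:
--         key = num // 10
--         value = num % 10
--         if (key in dict.keys(sorted)):
--             sorted[key].append(value)
--         else:
--             sorted[key] = [value]
--
--     return sorted
-- ===== SOURCE B (Python) =====
-- def sortNums(nums):
--     # Two staged passes: dedupe the tens-digit keys in first-occurrence order,
--     # then build each group by a per-key filter scan over nums (no incremental
--     # dict mutation / append at all).
--     keys = list(dict.fromkeys(n // 10 for n in nums))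
--     return {k: [n % 10 for n in nums if n // 10 == k] for k in keys}
-- ===== Notes on version B (the rewrite author's own statement) =====
-- stated objective: alternative
-- what changed: Replaces A's single pass that incrementally builds and mutates a dict (membership test, append or insert) by a two-stage computation: first dedupe the tens-digit keys in first-occurrence order, then construct each group in one shot with a per-key filter comprehension over the whole list; no dict value is ever mutated.
import Mathlib
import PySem

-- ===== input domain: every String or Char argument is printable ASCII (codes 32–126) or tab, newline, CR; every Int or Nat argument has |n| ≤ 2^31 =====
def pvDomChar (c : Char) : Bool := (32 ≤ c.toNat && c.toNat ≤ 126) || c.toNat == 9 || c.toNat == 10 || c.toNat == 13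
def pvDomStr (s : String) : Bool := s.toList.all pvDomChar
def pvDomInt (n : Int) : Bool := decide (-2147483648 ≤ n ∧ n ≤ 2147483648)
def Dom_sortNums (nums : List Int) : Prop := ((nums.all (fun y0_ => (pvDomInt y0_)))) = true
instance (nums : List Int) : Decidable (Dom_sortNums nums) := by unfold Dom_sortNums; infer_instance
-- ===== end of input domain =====

-- B replaces A's incremental dict-mutation pass by two staged passes: dedupe the keys in
-- first-occurrence order, then a per-key filter scan builds each group (objective: alternative).


-- ===== PORT A =====
-- literal port of A: a dict built by one pass; membership test, append or fresh insert
def sortNums (nums : List Int) : List (Int × List Int) :=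
  (nums.foldl
    (fun d num =>
      let key := PySem.Int.floordiv num 10
      let value := PySem.Int.mod num 10
      if d.contains key then d.modify key [] (fun l => l ++ [value])
      else d.insert key [value])
    PySem.Dict.empty).items

-- ===== PORT B =====
-- literal port of B: 'list(dict.fromkeys(n // 10 for n in nums))' is the keys deduped in
-- first-occurrence order (PySem.Set.ofList); the dict comprehension over these DISTINCT keys
-- yields exactly one item per key, in that order, so its items list is this map
def sortNums_alt (nums : List Int) : List (Int × List Int) :=
  let keys := PySem.Set.ofList (nums.map (fun n => PySem.Int.floordiv n 10))
  keys.map (fun k =>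
    (k, (nums.filter (fun n => PySem.Int.floordiv n 10 == k)).map (fun n => PySem.Int.mod n 10)))

-- ===== PRECONDITION & SPEC =====
def Spec_sortNums (nums : List Int) (out : List (Int × List Int)) : Prop := out = sortNums_alt nums
instance (nums : List Int) (out : List (Int × List Int)) : Decidable (Spec_sortNums nums out) := by unfold Spec_sortNums; infer_instance

-- ===== CLAIM (what is proved, stated in full; the proofs are below) =====
def Claim_equal_sortNums : Prop := ∀ (nums : List Int), Dom_sortNums nums → Spec_sortNums nums (sortNums nums)

-- ===== LEMMAS AND PROOFS =====

-- A's branching step is exactly 'modify' (append to the group, creating it if absent)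
theorem sortNums_step_eq (d : PySem.Dict Int (List Int)) (k : Int) (v : Int) :
    (if d.contains k then d.modify k [] (fun l => l ++ [v]) else d.insert k [v])
      = d.modify k [] (fun l => l ++ [v]) := by
  split
  · rfl
  · next h =>
    have h' : d.contains k = false := by simpa using h
    apply PySem.Dict.ext
    simp [PySem.Dict.modify, PySem.Dict.insert, h',
      PySem.Dict.getD_of_not_contains d [] h']

-- the value accumulated at key k by the modify loop, from any start dict d
theorem getD_modify_loop (nums : List Int) (d : PySem.Dict Int (List Int)) (k : Int) :
    (nums.foldl
      (fun d num => d.modify (PySem.Int.floordiv num 10) [] (fun l => l ++ [PySem.Int.mod num 10]))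
      d).getD k []
    = d.getD k []
      ++ ((nums.map (fun num => (PySem.Int.floordiv num 10, PySem.Int.mod num 10))).filter
            (fun p => p.1 == k)).map (·.2) := by
  rw [← PySem.Dict.getD_foldl_modify_append
      (l := nums.map (fun num => (PySem.Int.floordiv num 10, PySem.Int.mod num 10))) (d := d) (c := k),
    List.foldl_map]

theorem sortNums_spec_aux (nums : List Int) : sortNums nums = sortNums_alt nums := by
  unfold sortNums sortNums_alt
  have hstep : (nums.foldl
      (fun d num =>
        let key := PySem.Int.floordiv num 10
        let value := PySem.Int.mod num 10
        if d.contains key then d.modify key [] (fun l => l ++ [value])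
        else d.insert key [value])
      PySem.Dict.empty)
    = nums.foldl
        (fun d num => d.modify (PySem.Int.floordiv num 10) [] (fun l => l ++ [PySem.Int.mod num 10]))
        PySem.Dict.empty := by
    apply PySem.List.foldl_congr_mem
    intro d num _
    exact sortNums_step_eq d (PySem.Int.floordiv num 10) (PySem.Int.mod num 10)
  rw [hstep]
  have hkeysA : (nums.foldl
      (fun d num => d.modify (PySem.Int.floordiv num 10) [] (fun l => l ++ [PySem.Int.mod num 10]))
      PySem.Dict.empty).keys
      = PySem.Set.ofList (nums.map (fun num => PySem.Int.floordiv num 10)) := by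
    rw [PySem.Dict.keys_foldl_modify_key nums (fun num => PySem.Int.floordiv num 10) []
      (fun _ num l => l ++ [PySem.Int.mod num 10]) PySem.Dict.empty]
    simp [PySem.Dict.keys_empty, PySem.Set.update_nil_left]
  have hnodup : (PySem.Set.ofList (nums.map (fun num => PySem.Int.floordiv num 10))).Nodup :=
    PySem.Set.nodup_ofList _
  rw [PySem.Dict.items_eq_map_keys _ (hkeysA ▸ hnodup) ([] : List Int), hkeysA]
  refine List.map_congr_left (fun k _ => ?_)
  rw [getD_modify_loop, PySem.Dict.getD_empty]
  simp only [List.nil_append, Prod.mk.injEq, true_and]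
  simp only [List.filter_map, List.map_map, Function.comp_def]

-- ===== VERDICT (by name: the statement is the Claim_ definition above) =====
theorem sortNums_spec : Claim_equal_sortNums := by
  intro nums _
  exact sortNums_spec_aux nums
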